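-- pv_equiv track=rewrite | github.com/astrobleem/SNES-SuperMonkeyIsland | tools/decode_script.py | read_string_verbose
-- ===== SOURCE A (Python) =====
-- def read_string_verbose(data, pos):
--     """Read null-terminated string."""
--     chars = []
--     while pos < len(data):
--         b = data[pos]
--         pos += 1
--         if b == 0x00:
--             break
--         chars.append(chr(b) if 32 <= b < 127 else f"\\x{b:02x}")
--     return ''.join(chars), pos
-- ===== SOURCE B (Python) =====
-- def read_string_verbose(data, pos):
--     """Read null-terminated string."""
--     if pos >= len(data):
--         return "", pos
--     try:
--         end = data.index(0, pos)
--         newpos = end + 1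
--     except ValueError:
--         end = len(data)
--         newpos = len(data)
--     return "".join(chr(b) if 32 <= b < 127 else f"\\x{b:02x}" for b in data[pos:end]), newpos
-- ===== Notes on version B (the rewrite author's own statement) =====
-- stated objective: idiomatic
-- what changed: Replaces A's scan-and-break while loop (one pass doing bounds check, terminator test and escaping per byte) by first locating the null terminator with list.index and then mapping one escaping comprehension over the bounded slice.
-- intended difference: On -len(data) <= pos < 0, A reads via Python's negative-index wraparound (the tail from data[pos], restarting at the head if no null is met) and bookkeeps the position from the negative index (e.g. ('', -1)); B reads the null-terminated string at the Pythonically normalised position and returns the true next position, which is the intended value. — e.g. on read_string_verbose([72, 0, 105], -2): A returns ("", -1), B returns ("", 2)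
import Mathlib
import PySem

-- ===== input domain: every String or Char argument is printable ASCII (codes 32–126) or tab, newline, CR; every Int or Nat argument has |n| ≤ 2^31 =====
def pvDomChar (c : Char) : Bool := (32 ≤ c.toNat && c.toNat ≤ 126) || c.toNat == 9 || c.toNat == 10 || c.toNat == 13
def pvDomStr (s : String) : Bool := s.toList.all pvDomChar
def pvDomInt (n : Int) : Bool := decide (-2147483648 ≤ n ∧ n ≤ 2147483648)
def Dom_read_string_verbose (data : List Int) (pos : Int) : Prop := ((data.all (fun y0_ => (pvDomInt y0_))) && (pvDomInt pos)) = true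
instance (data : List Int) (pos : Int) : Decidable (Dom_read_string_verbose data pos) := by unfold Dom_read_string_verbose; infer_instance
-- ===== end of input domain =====

-- B replaces A's scan-and-break loop by locating the null terminator with list.index and then
-- mapping one comprehension over the bounded slice (objective: idiomatic/alternative, no speed claim).
-- On -len ≤ pos < 0 A scans with negative-index wraparound (tail, then restarting at the head);
-- B treats pos Pythonically as the tail start: stated as D_ below.

-- shared escaping helper: Python's  chr(b) if 32 <= b < 127 else f"\\x{b:02x}"
-- f"{b:02x}" exactly: lowercase hex, zero-padded to width 2 (the sign counts towards the width)
def pvHex02 (b : Int) : List Char :=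
  if b < 0 then '-' :: Nat.toDigits 16 b.natAbs
  else
    let ds := Nat.toDigits 16 b.toNat
    if ds.length < 2 then '0' :: ds else ds

def escByte (b : Int) : String :=
  if 32 ≤ b ∧ b < 127 then String.ofList [Char.ofNat b.toNat]
  else String.ofList ('\\' :: 'x' :: pvHex02 b)

-- ===== PORT A =====
-- the while loop: state (chars, pos); pyGet? none = Python's IndexError (outside Pre_)
-- fuel = the loop's iteration bound (len - pos); a totality guard only, never reached early
def readLoopA (data : List Int) : Nat → Int → List String → List String × Int
  | 0, pos, chars => (chars, pos)
  | fuel + 1, pos, chars =>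
    if pos < (data.length : Int) then
      match PySem.List.pyGet? data pos with
      | none => (chars, pos)      -- Python raises IndexError here; excluded by Pre_
      | some b =>
        if b = 0 then (chars, pos + 1)
        else readLoopA data fuel (pos + 1) (chars ++ [escByte b])
    else (chars, pos)

def read_string_verbose (data : List Int) (pos : Int) : String × Int :=
  let r := readLoopA data ((data.length : Int) - pos).toNat pos []
  (PySem.Str.join "" r.1, r.2)

-- ===== PORT B =====
-- data.index(0, pos): first index ≥ start of a 0, Python's negative-start normalisation
def read_string_verbose_alt (data : List Int) (pos : Int) : String × Int :=
  if (data.length : Int) ≤ pos then ("", pos)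
  else
    let s : Nat := (if pos < 0 then (data.length : Int) + pos else pos).toNat
    match (data.drop s).findIdx? (fun b => b == 0) with
    | some k =>
        (PySem.Str.join "" ((PySem.List.slice data (some pos) (some ((s + k : Nat) : Int))).map escByte),
         ((s + k : Nat) : Int) + 1)
    | none =>
        (PySem.Str.join "" ((PySem.List.slice data (some pos) (some ((data.length : Nat) : Int))).map escByte),
         (data.length : Int))

-- ===== PRECONDITION & SPEC =====
-- A raises IndexError exactly when pos < -len(data) (the first data[pos] is out of range)
def Pre_read_string_verbose (data : List Int) (pos : Int) : Prop :=
  -(data.length : Int) ≤ pos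

instance (data : List Int) (pos : Int) : Decidable (Pre_read_string_verbose data pos) := by
  unfold Pre_read_string_verbose; infer_instance

def pvWitness_read_string_verbose : List Int × Int := ([72, 105, 0, 33], 0)

-- On -len ≤ pos < 0, A reads via Python's negative-index wraparound — the tail from data[pos],
-- and if no null is met it restarts at the head — returning a wrapped string and a position
-- bookkept from the negative index; B reads the null-terminated string starting at that
-- (Pythonically normalised) position and returns the true next position, which is the intended value.
def D_read_string_verbose (_data : List Int) (pos : Int) : Prop := pos < 0

instance (data : List Int) (pos : Int) : Decidable (D_read_string_verbose data pos) := by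
  unfold D_read_string_verbose; infer_instance

def Spec_read_string_verbose (data : List Int) (pos : Int) (out : String × Int) : Prop :=
  ¬ D_read_string_verbose data pos → out = read_string_verbose_alt data pos

instance (data : List Int) (pos : Int) (out : String × Int) : Decidable (Spec_read_string_verbose data pos out) := by
  unfold Spec_read_string_verbose; infer_instance

def pvDiffWitness_read_string_verbose : List Int × Int := ([72, 0, 105], -2)
def pvDiffWitnessOut_read_string_verbose : (String × Int) × (String × Int) := (("", -1), ("", 2))

-- ===== CLAIM (what is proved, stated in full; the proofs are below) =====
def Claim_unchanged_read_string_verbose : Prop := ∀ (data : List Int) (pos : Int), Dom_read_string_verbose data pos → Pre_read_string_verbose data pos → Spec_read_string_verbose data pos (read_string_verbose data pos)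
def Claim_changed_read_string_verbose : Prop := Dom_read_string_verbose (pvDiffWitness_read_string_verbose.1) (pvDiffWitness_read_string_verbose.2) ∧ Pre_read_string_verbose (pvDiffWitness_read_string_verbose.1) (pvDiffWitness_read_string_verbose.2) ∧ D_read_string_verbose (pvDiffWitness_read_string_verbose.1) (pvDiffWitness_read_string_verbose.2) ∧ read_string_verbose (pvDiffWitness_read_string_verbose.1) (pvDiffWitness_read_string_verbose.2) = pvDiffWitnessOut_read_string_verbose.1 ∧ read_string_verbose_alt (pvDiffWitness_read_string_verbose.1) (pvDiffWitness_read_string_verbose.2) = pvDiffWitnessOut_read_string_verbose.2 ∧ pvDiffWitnessOut_read_string_verbose.1 ≠ pvDiffWitnessOut_read_string_verbose.2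

def Claim_exact_read_string_verbose : Prop := ∀ (data : List Int) (pos : Int), Dom_read_string_verbose data pos → Pre_read_string_verbose data pos → D_read_string_verbose data pos → read_string_verbose data pos ≠ read_string_verbose_alt data pos

-- ===== LEMMAS AND PROOFS =====

-- common reference computation: escape until (and consuming) the first 0, returning the count consumed
def scanZ (l : List Int) : List String × Nat :=
  match l with
  | [] => ([], 0)
  | b :: t => if b = 0 then ([], 1) else
      let r := scanZ t
      (escByte b :: r.1, r.2 + 1)

theorem readLoopA_eq_scanZ (data : List Int) :
    ∀ (n : Nat) (pos : Int) (acc : List String), 0 ≤ pos → data.length ≤ pos.toNat + n →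
    readLoopA data n pos acc =
      (acc ++ (scanZ (data.drop pos.toNat)).1, pos + ((scanZ (data.drop pos.toNat)).2 : Int)) := by
  intro n
  induction n with
  | zero =>
    intro pos acc hpos hlen
    have hdrop : data.drop pos.toNat = [] := List.drop_eq_nil_of_le (by omega)
    rw [readLoopA, hdrop]
    simp [scanZ]
  | succ n ih =>
    intro pos acc hpos hlen
    rw [readLoopA]
    by_cases h : pos < (data.length : Int)
    · have hlt : pos.toNat < data.length := by omega
      have hget : PySem.List.pyGet? data pos = some data[pos.toNat] := by
        have hc : pos = ((pos.toNat : Nat) : Int) := by omega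
        conv_lhs => rw [hc, PySem.List.pyGet?_natCast]
        exact List.getElem?_eq_getElem hlt
      have hdrop : data.drop pos.toNat = data[pos.toNat] :: data.drop (pos.toNat + 1) :=
        List.drop_eq_getElem_cons hlt
      rw [hdrop]
      simp only [h, if_pos, hget, scanZ]
      by_cases hz : data[pos.toNat] = 0
      · simp [hz]
      · simp only [hz, ite_false]
        have hpos1 : (pos + 1).toNat = pos.toNat + 1 := by omega
        rw [ih (pos + 1) (acc ++ [escByte data[pos.toNat]]) (by omega) (by omega), hpos1]
        simp
        omega
    · have hdrop : data.drop pos.toNat = [] := List.drop_eq_nil_of_le (by omega)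
      rw [hdrop]
      simp [h, scanZ]

theorem scanZ_findIdx? (l : List Int) :
    (match l.findIdx? (fun b => b == 0) with
     | some k => (scanZ l).1 = (l.take k).map escByte ∧ (scanZ l).2 = k + 1
     | none => (scanZ l).1 = l.map escByte ∧ (scanZ l).2 = l.length) := by
  induction l with
  | nil => simp [scanZ]
  | cons b t ih =>
    by_cases hz : b = 0
    · simp [List.findIdx?_cons, hz, scanZ]
    · rw [List.findIdx?_cons]
      simp only [beq_iff_eq, hz, ite_false]
      cases hf : t.findIdx? (fun b => b == 0) with
      | some k =>
        rw [hf] at ih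
        simp [scanZ, hz, ih.1, ih.2]
      | none =>
        rw [hf] at ih
        simp [scanZ, hz, ih.1, ih.2]

theorem escByte_toList_ne_nil (b : Int) : (escByte b).toList ≠ [] := by
  unfold escByte
  split_ifs <;> simp

theorem flatten_intersperse_nil (l : List (List Char)) :
    (List.intersperse ([] : List Char) l).flatten = l.flatten := by
  induction l with
  | nil => rfl
  | cons p t ih => cases t with
    | nil => rfl
    | cons q r => simp_all [List.intersperse]

theorem join_empty_len (parts : List String) :
    (PySem.Str.join "" parts).toList.length = (parts.map (fun t => t.toList.length)).sum := by
  rw [PySem.Str.toList_join]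
  show (PySem.Chars.join [] (parts.map String.toList)).length = _
  rw [show PySem.Chars.join ([] : List Char) (parts.map String.toList)
        = (parts.map String.toList).flatten from by
      simp [PySem.Chars.join, List.intercalate, flatten_intersperse_nil]]
  rw [List.length_flatten, List.map_map]
  rfl

-- the loop on a negative position: it scans the tail data[len-k:]; if no null is met there
-- it continues from index 0 with the escaped tail accumulated
theorem readLoopA_neg (data : List Int) :
    ∀ (k n : Nat) (acc : List String), 1 ≤ k → k ≤ data.length → data.length + k ≤ n →
    readLoopA data n (-(k : Int)) acc =
      (match (data.drop (data.length - k)).findIdx? (fun b => b == 0) with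
       | some _ => (acc ++ (scanZ (data.drop (data.length - k))).1,
                    -(k : Int) + ((scanZ (data.drop (data.length - k))).2 : Int))
       | none => readLoopA data (n - k) 0 (acc ++ (data.drop (data.length - k)).map escByte)) := by
  intro k
  induction k with
  | zero => intro n acc h1 _ _; exact absurd h1 (by omega)
  | succ k ih =>
    intro n acc h1 h2 h3
    obtain ⟨n', rfl⟩ : ∃ n', n = n' + 1 := ⟨n - 1, by omega⟩
    rw [readLoopA]
    have hslt : data.length - (k + 1) < data.length := by omega
    have hget : PySem.List.pyGet? data (-((k + 1 : Nat) : Int)) = some data[data.length - (k + 1)] := by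
      rw [PySem.List.pyGet?_neg_natCast data (k + 1) (by omega) (by omega)]
      exact List.getElem?_eq_getElem hslt
    have hdrop : data.drop (data.length - (k + 1)) =
        data[data.length - (k + 1)] :: data.drop (data.length - (k + 1) + 1) :=
      List.drop_eq_getElem_cons hslt
    rw [if_pos (show -((k + 1 : Nat) : Int) < (data.length : Int) by push_cast; omega)]
    simp only [hget]
    by_cases hz : data[data.length - (k + 1)] = 0
    · rw [if_pos hz, hdrop]
      simp only [List.findIdx?_cons, hz, beq_self_eq_true, if_pos, scanZ]
      simp only [List.append_nil, Prod.mk.injEq]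
      refine ⟨by trivial, by push_cast; omega⟩
    · rw [if_neg hz]
      by_cases hk : k = 0
      · subst hk
        have hd1 : data.drop (data.length - 1 + 1) = [] := by
          apply List.drop_eq_nil_of_le; omega
        rw [hdrop, hd1]
        simp only [List.findIdx?_cons, beq_iff_eq, hz, ite_false, List.findIdx?_nil,
          Option.map_none, List.map_cons, List.map_nil]
        rw [show -((0 + 1 : Nat) : Int) + 1 = 0 from by omega,
          show n' + 1 - (0 + 1) = n' from by omega]

      · have hcast : -(((k + 1 : Nat)) : Int) + 1 = -(k : Int) := by push_cast; ring
        rw [hcast, ih n' (acc ++ [escByte data[data.length - (k + 1)]]) (by omega) (by omega) (by omega)]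
        have hd1 : data.drop (data.length - (k + 1) + 1) = data.drop (data.length - k) := by
          congr 1; omega
        rw [hd1] at hdrop
        rw [hdrop]
        simp only [List.findIdx?_cons, beq_iff_eq, hz, ite_false]
        cases hf : (data.drop (data.length - k)).findIdx? (fun b => b == 0) with
        | some j =>
          simp only [Option.map_some, scanZ, hz, ite_false]
          simp only [List.append_assoc, List.cons_append, List.nil_append, Prod.mk.injEq]
          refine ⟨by simp, by push_cast; omega⟩
        | none =>
          simp only [Option.map_none, List.map_cons]
          congr 1
          · omega
          · simp

-- ===== VERDICT (by name: the statement is the Claim_ definition above) =====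
theorem read_string_verbose_spec : Claim_unchanged_read_string_verbose := by
  intro data pos _hdom _hpre hnd
  have hpos : 0 ≤ pos := by
    by_contra hc
    exact hnd (by unfold D_read_string_verbose; omega)
  unfold read_string_verbose read_string_verbose_alt
  have hA := readLoopA_eq_scanZ data ((data.length : Int) - pos).toNat pos [] hpos (by omega)
  by_cases hle : (data.length : Int) ≤ pos
  · have hdrop : data.drop pos.toNat = [] := List.drop_eq_nil_of_le (by omega)
    rw [hA, hdrop]
    simp [scanZ, hle]
    decide
  · have hlt : pos.toNat < data.length := by omega
    have hs : (if pos < 0 then (data.length : Int) + pos else pos).toNat = pos.toNat := by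
      rw [if_neg (by omega)]
    simp only [if_neg hle, hs]
    have hcast : pos = ((pos.toNat : Nat) : Int) := by omega
    have hspec := scanZ_findIdx? (data.drop pos.toNat)
    cases hf : (data.drop pos.toNat).findIdx? (fun b => b == 0) with
    | some k =>
      rw [hf] at hspec
      obtain ⟨h1, h2⟩ := hspec
      have hslice : PySem.List.slice data (some pos) (some ((pos.toNat + k : Nat) : Int)) =
          (data.drop pos.toNat).take k := by
        rw [hcast, PySem.List.slice_natCast]
        congr 1
        omega
      rw [hA]
      simp only [hslice, h1, h2, List.nil_append, Prod.mk.injEq]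
      refine ⟨by trivial, ?_⟩
      push_cast
      omega
    | none =>
      rw [hf] at hspec
      obtain ⟨h1, h2⟩ := hspec
      have hslice : PySem.List.slice data (some pos) (some ((data.length : Nat) : Int)) =
          data.drop pos.toNat := by
        rw [hcast, PySem.List.slice_natCast]
        exact List.take_of_length_le (by simp)
      rw [hA]
      simp only [hslice, h1, h2, List.nil_append, Prod.mk.injEq, List.length_drop]
      refine ⟨by trivial, ?_⟩
      omega

theorem read_string_verbose_changed : Claim_changed_read_string_verbose := by
  unfold Claim_changed_read_string_verbose; decide

theorem read_string_verbose_tight : Claim_exact_read_string_verbose := by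
  intro data pos _hdom hpre hd
  unfold Pre_read_string_verbose at hpre
  unfold D_read_string_verbose at hd
  obtain ⟨k, hk1, hk2, rfl⟩ : ∃ k : Nat, 1 ≤ k ∧ k ≤ data.length ∧ pos = -(k : Int) :=
    ⟨(-pos).toNat, by omega, by omega, by omega⟩
  have hfuel : ((data.length : Int) - -(k : Int)).toNat = data.length + k := by omega
  have hA : read_string_verbose data (-(k : Int)) =
      (PySem.Str.join "" (readLoopA data (data.length + k) (-(k : Int)) []).1,
       (readLoopA data (data.length + k) (-(k : Int)) []).2) := by
    unfold read_string_verbose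
    rw [hfuel]
  rw [hA, readLoopA_neg data k (data.length + k) [] hk1 hk2 le_rfl]
  have hsval : ((if -(k : Int) < 0 then (data.length : Int) + -(k : Int) else -(k : Int)).toNat)
      = data.length - k := by
    rw [if_pos (by omega)]
    omega
  have hnotle : ¬ ((data.length : Int) ≤ -(k : Int)) := by omega
  unfold read_string_verbose_alt
  rw [if_neg hnotle, hsval]
  have hlend : (data.drop (data.length - k)).length = k := by
    simp [List.length_drop]
    omega
  change _ ≠ (match (data.drop (data.length - k)).findIdx? (fun b => b == 0) with
    | some j =>
        (PySem.Str.join "" ((PySem.List.slice data (some (-(k : Int)))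
            (some ((data.length - k + j : Nat) : Int))).map escByte),
         ((data.length - k + j : Nat) : Int) + 1)
    | none =>
        (PySem.Str.join "" ((PySem.List.slice data (some (-(k : Int)))
            (some ((data.length : Nat) : Int))).map escByte),
         (data.length : Int)))
  cases hf : (data.drop (data.length - k)).findIdx? (fun b => b == 0) with
  | some j =>
    have hj : j < k := by
      obtain ⟨hlt, -, -⟩ := List.findIdx?_eq_some_iff_getElem.mp hf
      omega
    have hspec := scanZ_findIdx? (data.drop (data.length - k))
    rw [hf] at hspec
    simp only [List.nil_append]
    intro heq
    rw [Prod.mk.injEq] at heq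
    obtain ⟨-, h2⟩ := heq
    rw [hspec.2] at h2
    push_cast at h2
    omega
  | none =>
    have hall := List.findIdx?_eq_none_iff.mp hf
    have hslice : PySem.List.slice data (some (-(k : Int))) (some ((data.length : Nat) : Int)) =
        data.drop (data.length - k) := by
      unfold PySem.List.slice
      show List.take (PySem.List.clampIdx data.length ((data.length : Nat) : Int)
              - PySem.List.clampIdx data.length (-(k : Int)))
            (List.drop (PySem.List.clampIdx data.length (-(k : Int))) data) = _
      rw [PySem.List.clampIdx_neg_natCast _ _ (by omega), PySem.List.clampIdx_natCast]
      rw [List.take_of_length_le (by simp)]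
    simp only [Nat.add_sub_cancel, List.nil_append, hslice]
    rw [readLoopA_eq_scanZ data data.length 0 ((data.drop (data.length - k)).map escByte)
      le_rfl (by simp)]
    simp only [Int.toNat_zero, List.drop_zero]
    cases hg : data.findIdx? (fun b => b == 0) with
    | some m =>
      obtain ⟨hm, hm0, -⟩ := List.findIdx?_eq_some_iff_getElem.mp hg
      have hspec := scanZ_findIdx? data
      rw [hg] at hspec
      have hms : m < data.length - k := by
        by_contra hc
        have hgd : data[m] = (data.drop (data.length - k))[m - (data.length - k)]'(by
            simp [List.length_drop]; omega) := by
          rw [List.getElem_drop]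
          congr 1
          omega
        have hmem : data[m] ∈ data.drop (data.length - k) := by
          rw [hgd]
          exact List.getElem_mem _
        have hfalse := hall _ hmem
        simp at hfalse hm0
        omega
      intro heq
      rw [Prod.mk.injEq] at heq
      obtain ⟨-, h2⟩ := heq
      rw [hspec.2] at h2
      push_cast at h2
      omega
    | none =>
      have hspec := scanZ_findIdx? data
      rw [hg] at hspec
      intro heq
      rw [Prod.mk.injEq] at heq
      obtain ⟨h1, -⟩ := heq
      have hlen := congrArg (fun t : String => t.toList.length) h1
      simp only [join_empty_len] at hlen
      rw [hspec.1] at hlen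
      simp only [List.map_append, List.sum_append, List.map_map] at hlen
      obtain ⟨d, t, rfl⟩ : ∃ d t, data = d :: t := by
        cases data with
        | nil => exact absurd hk2 (by simp at hk1 ⊢; omega)
        | cons d t => exact ⟨d, t, rfl⟩
      have hne := escByte_toList_ne_nil d
      have hposl : 0 < (escByte d).toList.length := List.length_pos_iff.mpr hne
      simp only [List.map_cons, List.sum_cons, Function.comp] at hlen
      omega
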